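-- pv_equiv track=rewrite | github.com/gordonkratz/Project-Euler | Project Euler/75-100/98_AnagramicSquares.py | ConvertKey
-- ===== SOURCE A (Python) =====
-- import Utilities, math, itertools
--
-- def ConvertKey(s: str):
--     newKey = []
--     digit = 0
--     for key, group in itertools.groupby(sorted(s)):
--         for g in group:
--             newKey.append(str(digit))
--         digit += 1
--     return "".join(newKey)
-- ===== SOURCE B (Python) =====
-- def ConvertKey(s: str):
--     if not s:
--         return ""
--     counts = [0] * (max(map(ord, s)) + 1)
--     for ch in s:
--         counts[ord(ch)] += 1
--     out = []
--     rank = 0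
--     for cnt in counts:
--         if cnt:
--             out.append(str(rank) * cnt)
--             rank += 1
--     return "".join(out)
-- ===== Notes on version B (the rewrite author's own statement) =====
-- stated objective: faster
-- what changed: Replaces comparison sorting + itertools.groupby with a counting sort: one pass fills an ord-indexed bucket array of frequencies, then a scan over the buckets emits str(rank)*count for each nonzero bucket, so no sort and no groupby at all.
import Mathlib
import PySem

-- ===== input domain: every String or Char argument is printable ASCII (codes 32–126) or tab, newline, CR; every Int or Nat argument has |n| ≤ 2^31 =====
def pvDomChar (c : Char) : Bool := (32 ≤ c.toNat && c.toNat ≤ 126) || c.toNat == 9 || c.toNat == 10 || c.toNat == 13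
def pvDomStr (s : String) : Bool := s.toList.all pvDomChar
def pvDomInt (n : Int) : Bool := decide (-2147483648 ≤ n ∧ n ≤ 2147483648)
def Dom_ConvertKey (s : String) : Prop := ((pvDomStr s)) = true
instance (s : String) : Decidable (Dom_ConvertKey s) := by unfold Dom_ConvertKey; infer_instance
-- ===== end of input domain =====

-- B replaces A's comparison sort + itertools.groupby by a counting sort over an
-- ord-indexed bucket array, emitting str(rank)*count per nonzero bucket
-- (objective: faster; a timing run measured B faster).

-- ===== PORT A =====
-- itertools.groupby over a list of chars: consecutive runs as (key, group) pairs
def pyGroupby : List Char → List (Char × List Char)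
  | [] => []
  | c :: rest =>
    match pyGroupby rest with
    | [] => [(c, [c])]
    | (k, g) :: gs => if c = k then (k, c :: g) :: gs else (c, [c]) :: (k, g) :: gs

def ConvertKey (s : String) : String :=
  -- newKey = []; digit = 0; for key, group in groupby(sorted(s)): for g in group: newKey.append(str(digit)); digit += 1
  let st := (pyGroupby (PySem.List.sorted s.toList (fun c => c) false)).foldl
      (fun (st : List (List Char) × Int) kg =>
        (st.1 ++ kg.2.map (fun _ => PySem.Int.toChars st.2), st.2 + 1)) ([], 0)
  String.ofList (PySem.Chars.join [] st.1)

-- ===== PORT B =====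
def ConvertKey_alt (s : String) : String :=
  let chars := s.toList
  if chars = [] then "" else
  -- counts = [0] * (max(map(ord, s)) + 1); (max over a nonempty list of Nats = fold of max from 0)
  let m := chars.foldl (fun a c => max a c.toNat) 0
  -- for ch in s: counts[ord(ch)] += 1
  let counts := chars.foldl
      (fun (cs : List Nat) c => cs.set c.toNat (cs.getD c.toNat 0 + 1))
      (List.replicate (m + 1) 0)
  -- out = []; rank = 0; for cnt in counts: if cnt: out.append(str(rank) * cnt); rank += 1
  let st := counts.foldl
      (fun (st : List (List Char) × Int) (cnt : Nat) =>
        if cnt ≠ 0 then (st.1 ++ [PySem.List.pyRepeat (PySem.Int.toChars st.2) ((cnt : Int))], st.2 + 1)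
        else st) ([], 0)
  String.ofList (PySem.Chars.join [] st.1)

-- ===== PRECONDITION & SPEC =====
def Spec_ConvertKey (s : String) (out : String) : Prop := out = ConvertKey_alt s
instance (s : String) (out : String) : Decidable (Spec_ConvertKey s out) := by unfold Spec_ConvertKey; infer_instance

-- ===== CLAIM (what is proved, stated in full; the proofs are below) =====
def Claim_equal_ConvertKey : Prop := ∀ (s : String), Dom_ConvertKey s → Spec_ConvertKey s (ConvertKey s)

-- ===== LEMMAS AND PROOFS =====

-- consecutive dedup (destutter); on a sorted list this is the sorted list of distinct keys
def sdedup : List Char → List Char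
  | [] => []
  | [c] => [c]
  | c :: c2 :: rest => if c = c2 then sdedup (c2 :: rest) else c :: sdedup (c2 :: rest)

theorem sdedup_head (xs : List Char) (x : Char) : ∃ l', sdedup (x :: xs) = x :: l' := by
  induction xs generalizing x with
  | nil => exact ⟨[], rfl⟩
  | cons y ys ih =>
    by_cases h : x = y
    · subst h; obtain ⟨l', hl⟩ := ih x; exact ⟨l', by simp [sdedup, hl]⟩
    · exact ⟨sdedup (y :: ys), by simp [sdedup, h]⟩

theorem mem_sdedup (l : List Char) (x : Char) : x ∈ sdedup l ↔ x ∈ l := by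
  induction l with
  | nil => simp [sdedup]
  | cons c rest ih =>
    cases rest with
    | nil => simp [sdedup]
    | cons c2 r2 =>
      by_cases h : c = c2
      · subst h; simp [sdedup, ih]
      · simp [sdedup, h, ih]

theorem sdedup_pairwise (l : List Char) (h : l.Pairwise (· ≤ ·)) :
    (sdedup l).Pairwise (· < ·) := by
  induction l with
  | nil => simp [sdedup]
  | cons c rest ih =>
    cases rest with
    | nil => simp [sdedup]
    | cons c2 r2 =>
      rcases List.pairwise_cons.1 h with ⟨hle, htail⟩
      by_cases hcc : c = c2
      · simpa [sdedup, hcc] using ih htail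
      · have hlt : c < c2 := lt_of_le_of_ne (hle c2 (by simp)) hcc
        simp only [sdedup, if_neg hcc]
        refine List.pairwise_cons.2 ⟨?_, ih htail⟩
        intro y hy
        have hy' : y ∈ c2 :: r2 := (mem_sdedup _ _).1 hy
        rcases List.mem_cons.1 hy' with rfl | hy2
        · exact hlt
        · exact lt_of_lt_of_le hlt ((List.pairwise_cons.1 htail).1 y hy2)

theorem not_mem_of_head (c c2 : Char) (r2 : List Char)
    (h : (c :: c2 :: r2).Pairwise (· ≤ ·)) (hne : c ≠ c2) : c ∉ c2 :: r2 := by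
  rcases List.pairwise_cons.1 h with ⟨hle, htail⟩
  intro hmem
  rcases List.mem_cons.1 hmem with rfl | hmem2
  · exact hne rfl
  · have h1 : c ≤ c2 := hle c2 (by simp)
    have h2 : c2 ≤ c := (List.pairwise_cons.1 htail).1 c hmem2
    exact hne (le_antisymm h1 h2)

-- groupby on a sorted list = distinct keys with replicated counts
theorem groupby_eq (l : List Char) (h : l.Pairwise (· ≤ ·)) :
    pyGroupby l = (sdedup l).map (fun k => (k, List.replicate (l.count k) k)) := by
  induction l with
  | nil => rfl
  | cons c rest ih =>
    cases rest with
    | nil => simp [pyGroupby, sdedup]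
    | cons c2 r2 =>
      have htail : (c2 :: r2).Pairwise (· ≤ ·) := (List.pairwise_cons.1 h).2
      have ihr := ih htail
      obtain ⟨l', hl'⟩ := sdedup_head r2 c2
      have hpw : (sdedup (c2 :: r2)).Pairwise (· < ·) := sdedup_pairwise _ htail
      by_cases hcc : c = c2
      · have hkey : ∀ k ∈ l', c2 < k := by
          rw [hl'] at hpw; exact (List.pairwise_cons.1 hpw).1
        subst hcc
        show (match pyGroupby (c :: r2) with
          | [] => [(c, [c])]
          | (k, g) :: gs => if c = k then (k, c :: g) :: gs else (c, [c]) :: (k, g) :: gs) = _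
        rw [ihr, hl']
        simp only [List.map_cons, sdedup, if_pos]
        rw [hl', List.map_cons]
        refine congrArg₂ List.cons ?_ ?_
        · simp [List.replicate_succ]
        · apply List.map_congr_left
          intro k hk
          have : c < k := hkey k hk
          have hne : ¬ c = k := ne_of_lt this
          simp [hne]
      · have hnm : c ∉ c2 :: r2 := not_mem_of_head c c2 r2 h hcc
        show (match pyGroupby (c2 :: r2) with
          | [] => [(c, [c])]
          | (k, g) :: gs => if c = k then (k, c :: g) :: gs else (c, [c]) :: (k, g) :: gs) = _
        rw [ihr, hl']
        simp only [List.map_cons, if_neg hcc, sdedup]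
        rw [hl', List.map_cons]
        refine congrArg₂ List.cons ?_ (congrArg₂ List.cons ?_ ?_)
        · have hc0 : (c2 :: r2).count c = 0 := List.count_eq_zero.2 hnm
          simp [hc0]
        · have h1 : ¬ c2 = c := fun hx => hcc hx.symm
          simp [hcc]
        · apply List.map_congr_left
          intro k hk
          have hkmem : k ∈ c2 :: r2 := (mem_sdedup _ _).1 ((hl' ▸ List.mem_cons.2 (Or.inr hk)))
          have hne : ¬ k = c := by rintro rfl; exact hnm hkmem
          have hne' : ¬ c = k := fun hx => hne hx.symm
          simp [List.count_cons, hne']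

-- the A-side fold produces one piece str(digit) per group element
theorem foldA (L : List (Char × List Char)) (acc : List (List Char)) (d : Int) :
    (L.foldl (fun (st : List (List Char) × Int) kg =>
        (st.1 ++ kg.2.map (fun _ => PySem.Int.toChars st.2), st.2 + 1)) (acc, d)).1
    = acc ++ (PySem.List.enumerate L d).flatMap
        (fun p => p.2.2.map (fun _ => PySem.Int.toChars p.1)) := by
  induction L generalizing acc d with
  | nil => simp [PySem.List.enumerate]
  | cons kg L' ih =>
    simp only [List.foldl_cons, ih, PySem.List.enumerate_cons, List.flatMap_cons,
      List.append_assoc]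

theorem join_nil_eq_flatten (ps : List (List Char)) : PySem.Chars.join [] ps = ps.flatten := by
  induction ps with
  | nil => rfl
  | cons p ps ih =>
    cases ps with
    | nil => simp [PySem.Chars.join, List.intercalate]
    | cons q qs =>
      simp only [PySem.Chars.join, List.intercalate] at *
      simp [List.intersperse] at *
      simp [ih]

theorem pieces_eq (K : List Char) (d : Int) (cnt : Char → Nat) :
    ((PySem.List.enumerate (K.map (fun k => (k, List.replicate (cnt k) k))) d).flatMap
        (fun p => p.2.2.map (fun _ => PySem.Int.toChars p.1))).flatten
    = ((PySem.List.enumerate K d).map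
        (fun p => PySem.List.pyRepeat (PySem.Int.toChars p.1) ((cnt p.2 : Int)))).flatten := by
  induction K generalizing d with
  | nil => rfl
  | cons k K' ih =>
    rw [List.map_cons, PySem.List.enumerate_cons, PySem.List.enumerate_cons]
    simp only [List.flatMap_cons, List.map_cons, List.flatten_cons, List.flatten_append,
      List.map_replicate]
    rw [ih]
    congr 1

-- ===== B-side lemmas: counting sort characterisation =====

-- the per-index occurrence count
def codeCnt (chars : List Char) (i : Nat) : Nat := (chars.filter (fun c => c.toNat = i)).length

theorem char_toNat_lt {a b : Char} (h : a < b) : a.toNat < b.toNat := by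
  simpa [Char.lt_def, UInt32.lt_iff_toNat_lt] using h

theorem char_toNat_inj {a b : Char} (h : a.toNat = b.toNat) : a = b :=
  Char.ext (UInt32.toNat_inj.mp h)

theorem foldMax_le (l : List Char) (a : Nat) {c : Char} (hc : c ∈ l) :
    c.toNat ≤ l.foldl (fun a c => max a c.toNat) a := by
  induction l generalizing a with
  | nil => cases hc
  | cons x xs ih =>
    rcases List.mem_cons.1 hc with rfl | h
    · have hmono : ∀ (xs : List Char) (a : Nat), a ≤ xs.foldl (fun a c => max a c.toNat) a := by
        intro xs
        induction xs with
        | nil => intro a; exact le_rfl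
        | cons y ys ihy =>
          intro a
          exact le_trans (le_max_left a y.toNat) (ihy _)
      exact le_trans (le_max_right a c.toNat) (hmono xs _)
    · exact ih _ h

theorem getD_set_self (L : List Nat) (j : Nat) (hj : j < L.length) (v : Nat) :
    (L.set j v).getD j 0 = v := by
  simp [List.getD, hj]

theorem getD_set_ne (L : List Nat) (j i : Nat) (h : ¬ j = i) (v : Nat) :
    (L.set j v).getD i 0 = L.getD i 0 := by
  simp [List.getD, h]

theorem countsFold_length (cs : List Char) (L : List Nat) :
    (cs.foldl (fun (cs : List Nat) c => cs.set c.toNat (cs.getD c.toNat 0 + 1)) L).length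
    = L.length := by
  induction cs generalizing L with
  | nil => rfl
  | cons c cs ih =>
    rw [List.foldl_cons, ih]
    simp

theorem countsFold_getD (cs : List Char) (L : List Nat)
    (hin : ∀ c ∈ cs, c.toNat < L.length) (i : Nat) :
    (cs.foldl (fun (cs : List Nat) c => cs.set c.toNat (cs.getD c.toNat 0 + 1)) L).getD i 0
    = L.getD i 0 + codeCnt cs i := by
  induction cs generalizing L with
  | nil => simp [codeCnt]
  | cons c cs ih =>
    have hc : c.toNat < L.length := hin c (by simp)
    have hin' : ∀ x ∈ cs, x.toNat < (L.set c.toNat (L.getD c.toNat 0 + 1)).length := by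
      intro x hx; simpa using hin x (List.mem_cons.2 (Or.inr hx))
    rw [List.foldl_cons, ih _ hin']
    by_cases hi : c.toNat = i
    · rw [← hi, getD_set_self L c.toNat hc]
      have hcc : codeCnt (c :: cs) c.toNat = codeCnt cs c.toNat + 1 := by
        simp [codeCnt]
      rw [hcc]; omega
    · rw [getD_set_ne L c.toNat i hi]
      have hcc : codeCnt (c :: cs) i = codeCnt cs i := by
        simp [codeCnt, hi]
      rw [hcc]

-- the bucket array equals the count function tabulated over the index range
theorem counts_eq_map (chars : List Char) (m : Nat)
    (hin : ∀ c ∈ chars, c.toNat < m + 1) :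
    chars.foldl (fun (cs : List Nat) c => cs.set c.toNat (cs.getD c.toNat 0 + 1))
        (List.replicate (m + 1) 0)
    = (List.range (m + 1)).map (codeCnt chars) := by
  have hlen0 : (List.replicate (m + 1) (0 : Nat)).length = m + 1 := by simp
  apply List.ext_getElem
  · rw [countsFold_length]; simp
  · intro i h1 h2
    have hi : i < m + 1 := by rw [countsFold_length, hlen0] at h1; exact h1
    have hgd := countsFold_getD chars (List.replicate (m + 1) 0) (by simpa [hlen0] using hin) i
    have hrep : (List.replicate (m + 1) (0 : Nat)).getD i 0 = 0 := by
      simp [List.getD]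
    rw [hrep, Nat.zero_add] at hgd
    rw [← List.getD_eq_getElem _ 0 h1, hgd]
    simp

-- B's emit fold = map over the enumerated nonzero buckets
theorem foldB (cs : List Nat) (acc : List (List Char)) (d : Int) :
    (cs.foldl (fun (st : List (List Char) × Int) (cnt : Nat) =>
        if cnt ≠ 0 then (st.1 ++ [PySem.List.pyRepeat (PySem.Int.toChars st.2) ((cnt : Int))], st.2 + 1)
        else st) (acc, d)).1
    = acc ++ (PySem.List.enumerate (cs.filter (fun x => x ≠ 0)) d).map
        (fun p => PySem.List.pyRepeat (PySem.Int.toChars p.1) ((p.2 : Int))) := by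
  induction cs generalizing acc d with
  | nil => simp
  | cons c cs ih =>
    by_cases hc : c = 0
    · subst hc
      rw [List.foldl_cons, if_neg (by simp)]
      have hf : (0 :: cs).filter (fun x => x ≠ 0) = cs.filter (fun x => x ≠ 0) := by
        simp
      rw [hf, ih]
    · rw [List.foldl_cons, if_pos (by simpa using hc), ih]
      have hf : (c :: cs).filter (fun x => x ≠ 0) = c :: cs.filter (fun x => x ≠ 0) := by
        simp [hc]
      rw [hf, PySem.List.enumerate_cons, List.map_cons, List.append_assoc]
      rfl

theorem enumerate_map {α β : Type} (f : α → β) (l : List α) (d : Int) :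
    PySem.List.enumerate (l.map f) d = (PySem.List.enumerate l d).map (fun p => (p.1, f p.2)) := by
  induction l generalizing d with
  | nil => rfl
  | cons x xs ih =>
    rw [List.map_cons, PySem.List.enumerate_cons, PySem.List.enumerate_cons, ih, List.map_cons]

-- the list of nonzero bucket indices = the codes of the sorted distinct chars
theorem indices_eq (chars t : List Char) (m : Nat)
    (hperm : t.Perm chars) (hpw : t.Pairwise (· ≤ ·))
    (hin : ∀ c ∈ chars, c.toNat < m + 1) :
    (List.range (m + 1)).filter (fun i => codeCnt chars i ≠ 0)
    = (sdedup t).map Char.toNat := by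
  have hsd : (sdedup t).Pairwise (· < ·) := sdedup_pairwise t hpw
  have h1 : ((List.range (m + 1)).filter (fun i => codeCnt chars i ≠ 0)).Pairwise (· < ·) :=
    List.Pairwise.filter _ List.pairwise_lt_range
  have h2 : ((sdedup t).map Char.toNat).Pairwise (· < ·) :=
    List.Pairwise.map _ (fun a b hab => char_toNat_lt hab) hsd
  have hmem : ∀ i, (i ∈ (List.range (m + 1)).filter (fun i => codeCnt chars i ≠ 0))
      ↔ i ∈ (sdedup t).map Char.toNat := by
    intro i
    constructor
    · intro h
      rcases List.mem_filter.1 h with ⟨_, hcnt⟩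
      have hcnt' : codeCnt chars i ≠ 0 := by simpa using hcnt
      have hne : (chars.filter (fun c => c.toNat = i)) ≠ [] := by
        intro hnl; exact hcnt' (by simp [codeCnt, hnl])
      rcases List.exists_mem_of_ne_nil _ hne with ⟨c, hc⟩
      rcases List.mem_filter.1 hc with ⟨hcm, hci⟩
      have hci' : c.toNat = i := by simpa using hci
      refine List.mem_map.2 ⟨c, ?_, hci'⟩
      rw [mem_sdedup]
      exact hperm.mem_iff.2 hcm
    · intro h
      rcases List.mem_map.1 h with ⟨c, hcm, hci⟩
      have hcm' : c ∈ chars := hperm.mem_iff.1 ((mem_sdedup _ _).1 hcm)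
      refine List.mem_filter.2 ⟨?_, ?_⟩
      · exact List.mem_range.2 (hci ▸ hin c hcm')
      · have hmf : c ∈ chars.filter (fun x => x.toNat = i) :=
          List.mem_filter.2 ⟨hcm', by simp [hci]⟩
        have hl : (chars.filter (fun x => x.toNat = i)).length ≠ 0 := by
          intro h0
          rw [List.length_eq_zero_iff] at h0
          rw [h0] at hmf; cases hmf
        simpa [codeCnt] using hl
  have hp : ((List.range (m + 1)).filter (fun i => codeCnt chars i ≠ 0)).Perm
      ((sdedup t).map Char.toNat) :=
    (List.perm_ext_iff_of_nodup h1.nodup h2.nodup).2 hmem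
  exact List.Perm.eq_of_pairwise' (List.Pairwise.imp le_of_lt h1)
    (List.Pairwise.imp le_of_lt h2) hp

theorem codeCnt_toNat (chars : List Char) (k : Char) :
    codeCnt chars k.toNat = chars.count k := by
  unfold codeCnt
  induction chars with
  | nil => rfl
  | cons c cs ih =>
    by_cases h : c = k
    · subst h; simp [ih]
    · have h2 : ¬ c.toNat = k.toNat := fun hn => h (char_toNat_inj hn)
      simp [h, h2, ih]

-- the filtered bucket list = the counts of the sorted distinct chars, in order
theorem buckets_eq (chars t : List Char) (m : Nat)
    (hperm : t.Perm chars) (hpw : t.Pairwise (· ≤ ·))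
    (hin : ∀ c ∈ chars, c.toNat < m + 1) :
    ((List.range (m + 1)).map (codeCnt chars)).filter (fun x => x ≠ 0)
    = (sdedup t).map (fun k => chars.count k) := by
  rw [List.filter_map]
  have hpred : ((fun x => decide (x ≠ 0)) ∘ codeCnt chars)
      = (fun i => decide (codeCnt chars i ≠ 0)) := rfl
  rw [hpred, indices_eq chars t m hperm hpw hin, List.map_map]
  apply List.map_congr_left
  intro k _
  exact codeCnt_toNat chars k

-- ===== VERDICT (by name: the statement is the Claim_ definition above) =====
theorem ConvertKey_spec : Claim_equal_ConvertKey := by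
  intro s _
  unfold Spec_ConvertKey ConvertKey ConvertKey_alt
  by_cases hnil : s.toList = []
  · simp only [hnil]
    decide
  · simp only [if_neg hnil]
    have hpw : (PySem.List.sorted s.toList (fun c => c) false).Pairwise (· ≤ ·) :=
      PySem.List.sorted_pairwise s.toList (fun c => c)
    have hperm : (PySem.List.sorted s.toList (fun c => c) false).Perm s.toList :=
      PySem.List.sorted_perm s.toList (fun c => c) false
    have hin : ∀ c ∈ s.toList, c.toNat < s.toList.foldl (fun a c => max a c.toNat) 0 + 1 :=
      fun c hc => Nat.lt_succ_of_le (foldMax_le s.toList 0 hc)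
    simp only [groupby_eq _ hpw, foldA, List.nil_append, join_nil_eq_flatten,
      counts_eq_map s.toList _ hin, foldB, buckets_eq s.toList _ _ hperm hpw hin]
    rw [pieces_eq (sdedup (PySem.List.sorted s.toList (fun c => c) false)) 0
        (fun k => List.count k (PySem.List.sorted s.toList (fun c => c) false)),
      enumerate_map]
    congr 1
    rw [List.map_map]
    congr 1
    apply List.map_congr_left
    intro p _
    simp [Function.comp, hperm.count_eq]
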